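-- pv_equiv track=rewrite | github.com/Force-in-Motion/Algorithms-practice | hw_2/reverse_even_elements/src/main.py | reverse_even_elements
-- ===== SOURCE A (Python) =====
-- def reverse_even_elements(lst: list[int]) -> list[int]:
--     """
--     Обходит полученный список и делает реверс четных чисел в порядке убывания,
--     нечетные остаются на своих местах
--     :param lst: Пренимает список целых чисел
--     :return: Возвращает список с отсортированными четными числами в порядке убывания
--     """
--     for i in range(0, len(lst), 1):
--         if lst[i] % 2 == 0:
--             max_even = i
--
--             for j in range(i, len(lst), 1):
--                 if lst[j] % 2 == 0 and lst[j] > lst[max_even]: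
--                     lst[max_even], lst[j] = lst[j], lst[max_even]
--
--     return lst
-- ===== SOURCE B (Python) =====
-- def reverse_even_elements(lst: list[int]) -> list[int]:
--     """Sort the even values descending in place (library sort + one fill pass),
--     leaving odd values at their positions."""
--     evens = sorted((x for x in lst if x % 2 == 0), reverse=True)
--     it = iter(evens)
--     result = [next(it) if x % 2 == 0 else x for x in lst]
--     lst[:] = result
--     return lst
-- ===== Notes on version B (the rewrite author's own statement) =====
-- stated objective: alternative
-- what changed: A sorts the even values in place by a quadratic selection scheme (for each even slot, a nested scan that repeatedly swaps any larger even into that slot); B extracts the evens, sorts them descending with the library sort, and writes them back over the even slots in one pass.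
import Mathlib
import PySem

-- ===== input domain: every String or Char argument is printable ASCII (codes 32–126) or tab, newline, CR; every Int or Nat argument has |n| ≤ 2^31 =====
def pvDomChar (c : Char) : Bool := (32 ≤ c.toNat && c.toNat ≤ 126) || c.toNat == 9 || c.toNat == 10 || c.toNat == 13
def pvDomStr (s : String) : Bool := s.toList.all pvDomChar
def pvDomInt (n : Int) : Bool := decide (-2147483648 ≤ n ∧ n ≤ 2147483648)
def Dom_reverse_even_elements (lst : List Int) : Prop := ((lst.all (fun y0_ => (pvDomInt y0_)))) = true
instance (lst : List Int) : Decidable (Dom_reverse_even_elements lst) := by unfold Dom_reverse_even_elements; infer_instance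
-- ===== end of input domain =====

-- B replaces A's quadratic in-place selection (repeated max-scan with swaps) by one library sort
-- of the even values descending plus a single fill pass; the theorems are about the return value
-- (both Pythons also mutate lst to that same value).

-- ===== PORT A =====
-- inner-loop body: 'if lst[j] % 2 == 0 and lst[j] > lst[max_even]: lst[max_even], lst[j] = lst[j], lst[max_even]'
def pvInnerBody (i : Int) (l : List Int) (j : Int) : List Int :=
  if PySem.Int.mod (PySem.List.pyGetD l j 0) 2 = 0 ∧
      PySem.List.pyGetD l i 0 < PySem.List.pyGetD l j 0 then
    PySem.List.pySetD (PySem.List.pySetD l i (PySem.List.pyGetD l j 0)) j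
      (PySem.List.pyGetD l i 0)
  else l

def reverse_even_elements (lst : List Int) : List Int :=
  (PySem.List.pyRange 0 (lst.length : Int) 1).foldl
    (fun l i =>
      if PySem.Int.mod (PySem.List.pyGetD l i 0) 2 = 0 then
        -- max_even = i (A never reassigns it inside the inner loop)
        (PySem.List.pyRange i (l.length : Int) 1).foldl (pvInnerBody i) l
      else l)
    lst

-- ===== PORT B =====
-- 'result = [next(it) if x % 2 == 0 else x for x in lst]' — consumes the sorted evens in order;
-- the [] branch of the inner match is unreachable (the iterator holds one value per even slot)
def pvFill : List Int → List Int → List Int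
  | [], _ => []
  | x :: xs, es =>
    if PySem.Int.mod x 2 = 0 then
      match es with
      | e :: es' => e :: pvFill xs es'
      | [] => x :: pvFill xs []
    else x :: pvFill xs es

def reverse_even_elements_alt (lst : List Int) : List Int :=
  pvFill lst (PySem.List.sorted (lst.filter (fun x => PySem.Int.mod x 2 = 0)) (fun x => x) true)

-- ===== PRECONDITION & SPEC =====
def Spec_reverse_even_elements (lst : List Int) (out : List Int) : Prop := out = reverse_even_elements_alt lst
instance (lst : List Int) (out : List Int) : Decidable (Spec_reverse_even_elements lst out) := by unfold Spec_reverse_even_elements; infer_instance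

-- ===== CLAIM (what is proved, stated in full; the proofs are below) =====
def Claim_equal_reverse_even_elements : Prop := ∀ (lst : List Int), Dom_reverse_even_elements lst → Spec_reverse_even_elements lst (reverse_even_elements lst)

-- ===== LEMMAS AND PROOFS =====

def pvFilterE (l : List Int) : List Int := l.filter (fun x => PySem.Int.mod x 2 = 0)

def pvPass (c : Int) : List Int → Int × List Int
  | [] => (c, [])
  | y :: ys =>
    if PySem.Int.mod y 2 = 0 ∧ c < y then
      let p := pvPass y ys; (p.1, c :: p.2)
    else
      let p := pvPass c ys; (p.1, y :: p.2)
theorem pvPass_len (c : Int) (ys : List Int) : (pvPass c ys).2.length = ys.length := by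
  induction ys generalizing c with
  | nil => rfl
  | cons y ys ih => simp only [pvPass]; split <;> simp [ih]
def pvSelA : List Int → List Int
  | [] => []
  | x :: xs =>
    if PySem.Int.mod x 2 = 0 then
      let p := pvPass x xs
      p.1 :: pvSelA p.2
    else x :: pvSelA xs
termination_by l => l.length
decreasing_by
  · simp [pvPass_len]
  · simp
def pvPassE (c : Int) : List Int → Int × List Int
  | [] => (c, [])
  | y :: ys =>
    if c < y then
      let p := pvPassE y ys; (p.1, c :: p.2)
    else
      let p := pvPassE c ys; (p.1, y :: p.2)
theorem pvPassE_len (c : Int) (ys : List Int) : (pvPassE c ys).2.length = ys.length := by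
  induction ys generalizing c with
  | nil => rfl
  | cons y ys ih => simp only [pvPassE]; split <;> simp [ih]
def pvSelE : List Int → List Int
  | [] => []
  | x :: xs =>
    let p := pvPassE x xs
    p.1 :: pvSelE p.2
termination_by l => l.length
decreasing_by simp [pvPassE_len]

theorem pvSelE_len (l : List Int) : (pvSelE l).length = l.length := by
  induction l using pvSelE.induct with
  | case1 => simp [pvSelE]
  | case2 x xs p ih =>
    rw [pvSelE]
    simp only [List.length_cons]
    rw [ih, pvPassE_len]

theorem pvPassE_even (c : Int) (es : List Int) (hc : (2:Int) ∣ c)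
    (hes : ∀ e ∈ es, (2:Int) ∣ e) :
    (2:Int) ∣ (pvPassE c es).1 ∧ ∀ e ∈ (pvPassE c es).2, (2:Int) ∣ e := by
  induction es generalizing c with
  | nil => exact ⟨hc, by simp [pvPassE]⟩
  | cons y ys ih =>
    have hy := hes y (by simp)
    have hys : ∀ e ∈ ys, (2:Int) ∣ e := fun e h => hes e (by simp [h])
    simp only [pvPassE]
    split
    · obtain ⟨h1, h2⟩ := ih y hy hys
      exact ⟨h1, by simpa using ⟨hc, h2⟩⟩
    · obtain ⟨h1, h2⟩ := ih c hc hys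
      exact ⟨h1, by simpa using ⟨hy, h2⟩⟩

theorem pvPass_decomp (xs : List Int) : ∀ c,
    pvPass c xs = ((pvPassE c (pvFilterE xs)).1, pvFill xs (pvPassE c (pvFilterE xs)).2) := by
  induction xs with
  | nil => intro c; simp [pvPass, pvPassE, pvFilterE, pvFill]
  | cons y ys ih =>
    intro c
    by_cases hy : (2:Int) ∣ y
    · have hF : pvFilterE (y :: ys) = y :: pvFilterE ys := by simp [pvFilterE, hy]
      by_cases hcy : c < y
      · rw [hF]; simp [pvPass, pvPassE, pvFill, hy, hcy, ih y]
      · rw [hF]; simp [pvPass, pvPassE, pvFill, hy, hcy, ih c]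
    · have hF : pvFilterE (y :: ys) = pvFilterE ys := by simp [pvFilterE, hy]
      rw [hF]; simp [pvPass, pvFill, hy, ih c]

theorem pvFilterE_fill (xs : List Int) : ∀ es, es.length = (pvFilterE xs).length →
    (∀ e ∈ es, (2:Int) ∣ e) → pvFilterE (pvFill xs es) = es := by
  induction xs with
  | nil =>
    intro es h _
    have : es = [] := List.length_eq_zero_iff.mp (by simpa [pvFilterE] using h)
    simp [this, pvFill, pvFilterE]
  | cons x xs ih =>
    intro es hlen hev
    by_cases h : (2:Int) ∣ x
    · simp [pvFilterE, h] at hlen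
      cases es with
      | nil => simp at hlen
      | cons e es' =>
        simp at hlen
        have he := hev e (by simp)
        simp [pvFill, pvFilterE, h, he] at ih ⊢
        exact ih es' (by simpa [pvFilterE] using hlen) (fun e' h' => hev e' (by simp [h']))
    · simp [pvFilterE, h] at hlen
      simp [pvFill, pvFilterE, h] at ih ⊢
      exact ih es (by simpa [pvFilterE] using hlen) hev

theorem pvFill_fill (xs : List Int) : ∀ es ws, es.length = (pvFilterE xs).length →
    (∀ e ∈ es, (2:Int) ∣ e) → ws.length = es.length → pvFill (pvFill xs es) ws = pvFill xs ws := by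
  induction xs with
  | nil => intro es ws _ _ _; rfl
  | cons x xs ih =>
    intro es ws hlen hev hw
    by_cases h : (2:Int) ∣ x
    · simp [pvFilterE, h] at hlen
      cases es with
      | nil => simp at hlen
      | cons e es' =>
        simp at hlen
        have he := hev e (by simp)
        cases ws with
        | nil => simp at hw
        | cons w ws' =>
          simp at hw
          have ih' := ih es' ws' (by simpa [pvFilterE] using hlen)
            (fun e' h' => hev e' (by simp [h'])) hw
          simp [pvFill, h, he, ih']
    · simp [pvFilterE, h] at hlen
      have ih' := ih es ws (by simpa [pvFilterE] using hlen) hev hw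
      simp [pvFill, h, ih']

theorem pvFill_len (xs : List Int) : ∀ es, (pvFill xs es).length = xs.length := by
  induction xs with
  | nil => intro es; rfl
  | cons x xs ih =>
    intro es
    simp only [pvFill]
    split
    · cases es <;> simp [ih]
    · simp [ih]

theorem pvSelA_decomp (k : Nat) : ∀ xs : List Int, xs.length = k →
    pvSelA xs = pvFill xs (pvSelE (pvFilterE xs)) := by
  induction k with
  | zero => intro xs h; simp [List.length_eq_zero_iff.mp h, pvSelA, pvSelE, pvFilterE, pvFill]
  | succ k ih =>
    intro xs hlen
    cases xs with
    | nil => simp at hlen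
    | cons x xs =>
      simp at hlen
      by_cases hx : (2:Int) ∣ x
      · have hF : pvFilterE (x :: xs) = x :: pvFilterE xs := by simp [pvFilterE, hx]
        have hmod : PySem.Int.mod x 2 = 0 := by simpa using hx
        rw [pvSelA, if_pos hmod, hF, pvSelE]
        simp only [pvPass_decomp xs x]
        set m := (pvPassE x (pvFilterE xs)).1 with hm
        set zs := (pvPassE x (pvFilterE xs)).2 with hz
        have hzlen : zs.length = (pvFilterE xs).length := by rw [hz, pvPassE_len]
        have hzev : ∀ e ∈ zs, (2:Int) ∣ e := by
          have := pvPassE_even x (pvFilterE xs) hx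
            (by intro e he; simp [pvFilterE] at he; exact he.2)
          exact this.2
        have hfl : (pvFill xs zs).length = k := by rw [pvFill_len]; exact hlen
        have ihz := ih (pvFill xs zs) hfl
        rw [ihz, pvFilterE_fill xs zs hzlen hzev]
        rw [pvFill_fill xs zs (pvSelE zs) hzlen hzev (by rw [pvSelE_len, hzlen])]
        simp only [pvFill, if_pos hmod]
      · have hF : pvFilterE (x :: xs) = pvFilterE xs := by simp [pvFilterE, hx]
        have hmod : ¬ PySem.Int.mod x 2 = 0 := by simpa using hx
        rw [pvSelA, if_neg hmod, hF]
        rw [ih xs hlen]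
        simp only [pvFill, if_neg hmod]

theorem pvPassE_perm (c : Int) (es : List Int) :
    ((pvPassE c es).1 :: (pvPassE c es).2).Perm (c :: es) := by
  induction es generalizing c with
  | nil => simp [pvPassE]
  | cons y ys ih =>
    simp only [pvPassE]
    split
    · exact (List.Perm.swap c (pvPassE y ys).1 (pvPassE y ys).2).trans
        (List.Perm.cons c (ih y))
    · exact ((List.Perm.swap y (pvPassE c ys).1 (pvPassE c ys).2).trans
        (List.Perm.cons y (ih c))).trans (List.Perm.swap c y ys)

theorem pvPassE_max (c : Int) (es : List Int) :
    c ≤ (pvPassE c es).1 ∧ ∀ e ∈ (pvPassE c es).2, e ≤ (pvPassE c es).1 := by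
  induction es generalizing c with
  | nil => simp [pvPassE]
  | cons y ys ih =>
    simp only [pvPassE]
    split
    · rename_i hcy
      obtain ⟨h1, h2⟩ := ih y
      refine ⟨le_of_lt (lt_of_lt_of_le hcy h1), ?_⟩
      intro e he
      simp at he
      rcases he with rfl | he
      · exact le_of_lt (lt_of_lt_of_le hcy h1)
      · exact h2 e he
    · rename_i hcy
      replace hcy : y ≤ c := not_lt.mp hcy
      obtain ⟨h1, h2⟩ := ih c
      refine ⟨h1, ?_⟩
      intro e he
      simp at he
      rcases he with rfl | he
      · exact le_trans hcy h1
      · exact h2 e he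

theorem pvSelE_perm (k : Nat) : ∀ es : List Int, es.length = k → (pvSelE es).Perm es := by
  induction k with
  | zero => intro es h; simp [List.length_eq_zero_iff.mp h, pvSelE]
  | succ k ih =>
    intro es hlen
    cases es with
    | nil => simp at hlen
    | cons x xs =>
      simp at hlen
      rw [pvSelE]
      have h1 := ih (pvPassE x xs).2 (by rw [pvPassE_len]; exact hlen)
      exact (List.Perm.cons _ h1).trans (pvPassE_perm x xs)

theorem pvSelE_pairwise (k : Nat) : ∀ es : List Int, es.length = k →
    (pvSelE es).Pairwise (fun a b => b ≤ a) := by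
  induction k with
  | zero => intro es h; simp [List.length_eq_zero_iff.mp h, pvSelE]
  | succ k ih =>
    intro es hlen
    cases es with
    | nil => simp at hlen
    | cons x xs =>
      simp at hlen
      rw [pvSelE]
      refine List.Pairwise.cons ?_ (ih _ (by rw [pvPassE_len]; exact hlen))
      intro b hb
      have hperm := pvSelE_perm k (pvPassE x xs).2 (by rw [pvPassE_len]; exact hlen)
      have hb' : b ∈ (pvPassE x xs).2 := hperm.mem_iff.mp hb
      exact (pvPassE_max x xs).2 b hb'

theorem pvSelE_sorted (es : List Int) :
    pvSelE es = PySem.List.sorted es (fun x => x) true := by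
  apply List.Perm.eq_of_pairwise (le := fun a b => b ≤ a)
  · intro a b _ _ h1 h2; omega
  · exact pvSelE_pairwise es.length es rfl
  · exact PySem.List.sorted_pairwise_rev es (fun x => x)
  · exact (pvSelE_perm es.length es rfl).trans (PySem.List.sorted_perm es (fun x => x) true).symm

theorem pvGetAt (pre : List Int) (c : Int) (tl : List Int) :
    PySem.List.pyGetD (pre ++ c :: tl) ((pre.length : Nat) : Int) 0 = c := by
  rw [PySem.List.pyGetD_natCast]
  induction pre with
  | nil => simp
  | cons h t ih => simpa using ih

theorem pvSetAt (pre : List Int) (c : Int) (tl : List Int) (v : Int) :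
    PySem.List.pySetD (pre ++ c :: tl) ((pre.length : Nat) : Int) v = pre ++ v :: tl := by
  rw [PySem.List.pySetD_natCast]
  induction pre with
  | nil => simp
  | cons h t ih => simpa using ih

theorem pv_inner_bridge (pre : List Int) : ∀ (rest mid : List Int) (c : Int),
    (PySem.List.pyRange ((pre.length : Int) + 1 + (mid.length : Int))
        ((pre.length : Int) + 1 + (mid.length : Int) + (rest.length : Int)) 1).foldl
      (pvInnerBody ((pre.length : Int))) (pre ++ c :: (mid ++ rest))
    = pre ++ (pvPass c rest).1 :: (mid ++ (pvPass c rest).2) := by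
  intro rest
  induction rest with
  | nil =>
    intro mid c
    rw [PySem.List.pyRange_one_eq_nil (by simp)]
    simp [pvPass]
  | cons y ys ih =>
    intro mid c
    rw [PySem.List.pyRange_one_cons (by simp only [List.length_cons]; push_cast; omega)]
    rw [List.foldl_cons]
    have hsplit : pre ++ c :: (mid ++ y :: ys) = (pre ++ c :: mid) ++ y :: ys := by simp
    have hlen2 : (((pre ++ c :: mid).length : Nat) : Int)
        = (pre.length : Int) + 1 + (mid.length : Int) := by simp only [List.length_append, List.length_cons]; push_cast; ring
    have g2 : PySem.List.pyGetD (pre ++ c :: (mid ++ y :: ys))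
        ((pre.length : Int) + 1 + (mid.length : Int)) 0 = y := by
      rw [hsplit, ← hlen2, pvGetAt]
    have g1 : PySem.List.pyGetD (pre ++ c :: (mid ++ y :: ys)) ((pre.length : Int)) 0 = c := by
      have := pvGetAt pre c (mid ++ y :: ys); simpa using this
    rw [show pvInnerBody ((pre.length : Int)) (pre ++ c :: (mid ++ y :: ys))
          ((pre.length : Int) + 1 + (mid.length : Int))
        = if PySem.Int.mod y 2 = 0 ∧ c < y then
            PySem.List.pySetD (PySem.List.pySetD (pre ++ c :: (mid ++ y :: ys))
              ((pre.length : Int)) y) ((pre.length : Int) + 1 + (mid.length : Int)) c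
          else (pre ++ c :: (mid ++ y :: ys))
      from by rw [pvInnerBody, g1, g2]]
    by_cases hc : PySem.Int.mod y 2 = 0 ∧ c < y
    · rw [if_pos hc]
      have hset1 : PySem.List.pySetD (pre ++ c :: (mid ++ y :: ys)) ((pre.length : Int)) y
          = pre ++ y :: (mid ++ y :: ys) := by
        have := pvSetAt pre c (mid ++ y :: ys) y; simpa using this
      rw [hset1]
      have hset2 : PySem.List.pySetD (pre ++ y :: (mid ++ y :: ys))
          ((pre.length : Int) + 1 + (mid.length : Int)) c
          = pre ++ y :: (mid ++ c :: ys) := by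
        have hsplit2 : pre ++ y :: (mid ++ y :: ys) = (pre ++ y :: mid) ++ y :: ys := by simp
        have hlen3 : (((pre ++ y :: mid).length : Nat) : Int)
            = (pre.length : Int) + 1 + (mid.length : Int) := by
          simp only [List.length_append, List.length_cons]; push_cast; ring
        rw [hsplit2, ← hlen3, pvSetAt]
        simp
      rw [hset2]
      have harr : pre ++ y :: (mid ++ c :: ys) = pre ++ y :: ((mid ++ [c]) ++ ys) := by simp
      rw [harr]
      have hrange : (PySem.List.pyRange ((pre.length : Int) + 1 + (mid.length : Int) + 1)
            ((pre.length : Int) + 1 + (mid.length : Int) + ((y :: ys).length : Int)) 1)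
          = (PySem.List.pyRange ((pre.length : Int) + 1 + ((mid ++ [c]).length : Int))
            ((pre.length : Int) + 1 + ((mid ++ [c]).length : Int) + ((ys).length : Int)) 1) := by
        congr 1 <;> · simp only [List.length_append, List.length_cons, List.length_nil]
                      push_cast; ring
      rw [hrange, ih (mid ++ [c]) y]
      have hdvd : (2:Int) ∣ y := by simpa using hc.1
      simp [pvPass, hdvd, hc.2]
    · rw [if_neg hc]
      have harr : pre ++ c :: (mid ++ y :: ys) = pre ++ c :: ((mid ++ [y]) ++ ys) := by simp
      rw [harr]
      have hrange : (PySem.List.pyRange ((pre.length : Int) + 1 + (mid.length : Int) + 1)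
            ((pre.length : Int) + 1 + (mid.length : Int) + ((y :: ys).length : Int)) 1)
          = (PySem.List.pyRange ((pre.length : Int) + 1 + ((mid ++ [y]).length : Int))
            ((pre.length : Int) + 1 + ((mid ++ [y]).length : Int) + ((ys).length : Int)) 1) := by
        congr 1 <;> · simp only [List.length_append, List.length_cons, List.length_nil]
                      push_cast; ring
      rw [hrange, ih (mid ++ [y]) c]
      have hnc : ¬ ((2:Int) ∣ y ∧ c < y) := by simpa using hc
      simp [pvPass, hnc]

theorem pv_inner_start (pre : List Int) (c : Int) (rest : List Int) :
    (PySem.List.pyRange ((pre.length : Int))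
        ((pre.length : Int) + 1 + (rest.length : Int)) 1).foldl
      (pvInnerBody ((pre.length : Int))) (pre ++ c :: rest)
    = pre ++ (pvPass c rest).1 :: (pvPass c rest).2 := by
  rw [PySem.List.pyRange_one_cons (by push_cast; omega)]
  rw [List.foldl_cons]
  have g1 : PySem.List.pyGetD (pre ++ c :: rest) ((pre.length : Int)) 0 = c := pvGetAt pre c rest
  have hb : pvInnerBody ((pre.length : Int)) (pre ++ c :: rest) ((pre.length : Int))
      = pre ++ c :: rest := by
    rw [pvInnerBody, g1]
    simp
  rw [hb]
  have := pv_inner_bridge pre rest [] c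
  simpa using this

theorem pv_outer_bridge (k : Nat) : ∀ (suf pre : List Int), suf.length = k →
    (PySem.List.pyRange ((pre.length : Int)) ((pre.length : Int) + (suf.length : Int)) 1).foldl
      (fun l i =>
        if PySem.Int.mod (PySem.List.pyGetD l i 0) 2 = 0 then
          (PySem.List.pyRange i (l.length : Int) 1).foldl (pvInnerBody i) l
        else l)
      (pre ++ suf)
    = pre ++ pvSelA suf := by
  induction k with
  | zero =>
    intro suf pre h
    rw [List.length_eq_zero_iff.mp h]
    rw [PySem.List.pyRange_one_eq_nil (by simp)]
    simp [pvSelA]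
  | succ k ih =>
    intro suf pre hlen
    cases suf with
    | nil => simp at hlen
    | cons x xs =>
      simp at hlen
      rw [PySem.List.pyRange_one_cons (by simp only [List.length_cons]; push_cast; omega)]
      rw [List.foldl_cons]
      have g1 : PySem.List.pyGetD (pre ++ x :: xs) ((pre.length : Int)) 0 = x := pvGetAt pre x xs
      have hL : ((pre ++ x :: xs).length : Int) = (pre.length : Int) + 1 + (xs.length : Int) := by
        simp only [List.length_append, List.length_cons]; push_cast; ring
      by_cases hx : PySem.Int.mod x 2 = 0
      · rw [g1, if_pos hx, hL, pv_inner_start pre x xs]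
        have harr : pre ++ (pvPass x xs).1 :: (pvPass x xs).2
            = (pre ++ [(pvPass x xs).1]) ++ (pvPass x xs).2 := by simp
        rw [harr]
        have hr : PySem.List.pyRange ((pre.length : Int) + 1)
              ((pre.length : Int) + ((x :: xs).length : Int)) 1
            = PySem.List.pyRange (((pre ++ [(pvPass x xs).1]).length : Int))
              (((pre ++ [(pvPass x xs).1]).length : Int) + (((pvPass x xs).2).length : Int)) 1 := by
          congr 1 <;> · simp only [List.length_append, List.length_cons, List.length_nil,
                          pvPass_len]
                        push_cast; ring
        rw [hr, ih (pvPass x xs).2 (pre ++ [(pvPass x xs).1]) (by rw [pvPass_len]; exact hlen)]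
        rw [pvSelA, if_pos hx]
        simp
      · rw [g1, if_neg hx]
        have harr : pre ++ x :: xs = (pre ++ [x]) ++ xs := by simp
        rw [harr]
        have hr : PySem.List.pyRange ((pre.length : Int) + 1)
              ((pre.length : Int) + ((x :: xs).length : Int)) 1
            = PySem.List.pyRange (((pre ++ [x]).length : Int))
              (((pre ++ [x]).length : Int) + ((xs).length : Int)) 1 := by
          congr 1 <;> · simp only [List.length_append, List.length_cons, List.length_nil]
                        push_cast; ring
        rw [hr, ih xs (pre ++ [x]) hlen]
        rw [pvSelA, if_neg hx]
        simp

theorem pvMain (lst : List Int) :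
    reverse_even_elements lst = reverse_even_elements_alt lst := by
  have h := pv_outer_bridge lst.length lst [] rfl
  simp only [List.length_nil, Nat.cast_zero, List.nil_append, zero_add] at h
  rw [reverse_even_elements, h, reverse_even_elements_alt]
  rw [pvSelA_decomp lst.length lst rfl, pvSelE_sorted]
  rfl

-- ===== VERDICT (by name: the statement is the Claim_ definition above) =====
theorem reverse_even_elements_spec : Claim_equal_reverse_even_elements := by
  intro lst _
  unfold Spec_reverse_even_elements
  exact pvMain lst
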